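-- pv_equiv track=rewrite | github.com/qiminchen/CoralNet | datasets/geometric_augmentation.py | _get_k
-- ===== SOURCE A (Python) =====
-- def _get_k(rarity):
--     # check how many augmented images needed by labels rarity
--     if rarity <= 200:
--         return 7
--     if 200 < rarity <= 400:
--         return 5
--     bounds = [400, 600, 800, 1000]
--     k = 3
--     for idx, (lower, upper) in enumerate(zip(bounds[:-1], bounds[1:])):
--         if lower < rarity <= upper:
--             k = 3 - idx
--     return k
-- ===== SOURCE B (Python) =====
-- def _get_k(rarity):
--     # Closed form: bucket the rarity into fixed-width bands by floor division,
--     # then compute k arithmetically from the bucket index.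
--     if rarity > 1000:
--         return 3
--     bucket = max((rarity - 1) // 200, 0)
--     return 7 - 2 * bucket if bucket < 2 else 5 - bucket
-- ===== Notes on version B (the rewrite author's own statement) =====
-- stated objective: simpler
-- what changed: Replaced the guard ifs and the enumerate/zip last-match table loop by a closed-form arithmetic computation: a single floor division buckets rarity into fixed-width bands and k is computed from the bucket index by a linear formula (no table, no loop).
import Mathlib
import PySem

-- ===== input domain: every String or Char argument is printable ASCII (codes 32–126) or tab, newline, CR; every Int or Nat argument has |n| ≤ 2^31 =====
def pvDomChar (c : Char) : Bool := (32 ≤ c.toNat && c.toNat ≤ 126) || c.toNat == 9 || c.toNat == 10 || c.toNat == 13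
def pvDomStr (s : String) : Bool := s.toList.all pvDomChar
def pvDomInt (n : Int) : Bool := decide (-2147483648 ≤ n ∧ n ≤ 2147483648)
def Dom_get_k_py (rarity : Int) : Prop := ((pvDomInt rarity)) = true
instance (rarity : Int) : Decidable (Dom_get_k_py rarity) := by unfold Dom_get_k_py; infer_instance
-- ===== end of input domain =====

-- B replaces A's guard ifs and last-match window loop by a closed-form bucket formula via one floor division (simpler).


-- ===== PORT A =====
-- Transliteration of A: guard ifs, then the enumerate/zip last-match loop over bound windows.
def get_k_py (rarity : Int) : Int :=
  if rarity ≤ 200 then 7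
  else if 200 < rarity ∧ rarity ≤ 400 then 5
  else
    -- bounds = [400,600,800,1000]; enumerate(zip(bounds[:-1], bounds[1:]))
    let pairs : List (Int × (Int × Int)) := [(0,(400,600)), (1,(600,800)), (2,(800,1000))]
    pairs.foldl (fun k p =>
      if p.2.1 < rarity ∧ rarity ≤ p.2.2 then 3 - p.1 else k) 3

-- ===== PORT B =====
-- Transliteration of B: one floor division buckets rarity, then a linear formula gives k.
def get_k_py_alt (rarity : Int) : Int :=
  if rarity > 1000 then 3
  else
    let bucket := max (PySem.Int.floordiv (rarity - 1) 200) 0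
    if bucket < 2 then 7 - 2 * bucket else 5 - bucket

-- ===== PRECONDITION & SPEC =====
def Spec_get_k_py (rarity : Int) (out : Int) : Prop := out = get_k_py_alt rarity
instance (rarity : Int) (out : Int) : Decidable (Spec_get_k_py rarity out) := by unfold Spec_get_k_py; infer_instance

-- ===== CLAIM =====
def Claim_equal_get_k_py : Prop := ∀ (rarity : Int), Dom_get_k_py rarity → Spec_get_k_py rarity (get_k_py rarity)

-- ===== LEMMAS AND PROOFS =====

-- ===== VERDICT =====
theorem get_k_py_spec : Claim_equal_get_k_py := by
  intro rarity _
  unfold Spec_get_k_py get_k_py get_k_py_alt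
  rw [PySem.Int.floordiv_eq_ediv_of_pos (by norm_num)]
  simp only [List.foldl]
  split_ifs <;> omega
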